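-- pv_equiv track=rewrite | github.com/gilas19/RushHour | planning/rushhour.py | parse_vehicle_list
-- ===== SOURCE A (Python) =====
-- def parse_vehicle_list(content):
--     # parse vehicle list from problem file
--     # update main_vehicle, horizontal_vehicles and vertical_vehicles
--
--     main_vehicle = [[-1, -1], [-1, -1]]  # (left(x,y), right(x,y))
--     horizontal_vehicles = []  # (name, left(x,y), right(x,y)) name = h0
--     vertical_vehicles = []  # (name, up(x,y), bottom(x,y)) name = v0
--     empty_squares = []
--     vehicles = dict()  # letter : (start(x,y) , end(x,y))
--
--     # parse board into list of vehicles
--     for row_index, line in enumerate(content):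
--         for column_index, letter in enumerate(line):
--             vehicle_type = letter if letter.isupper() else None
--             if vehicle_type:
--                 if vehicle_type == "X":
--                     if main_vehicle[0][0] == -1:
--                         main_vehicle[0] = [column_index, row_index]
--                     main_vehicle[1] = [column_index, row_index]
--                     continue
--                 if letter not in vehicles.keys():
--                     # set start location
--                     vehicles[letter] = (
--                         column_index,
--                         row_index,
--                         column_index,
--                         row_index,
--                     )
--                 else:
--                     # update end location
--                     vehicles[letter] = (
--                         vehicles[letter][0],
--                         vehicles[letter][1],
--                         column_index,
--                         row_index,
--                     )
--             else:
--                 empty_squares.append((column_index, row_index))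
--
--     # parse vehicle list into categories
--     for letter in vehicles:
--         startX, startY, endX, endY = vehicles[letter]
--         if startX == endX:
--             vertical_vehicles.append((letter, (startX, startY), (endX, endY)))
--         elif startY == endY:
--             horizontal_vehicles.append((letter, (startX, startY), (endX, endY)))
--
--     return main_vehicle, horizontal_vehicles, vertical_vehicles, empty_squares
-- ===== SOURCE B (Python) =====
-- def parse_vehicle_list(content):
--     # Staged passes over a flattened cell list: empties by one filter, distinct
--     # letters by a first-occurrence scan, then one filter pass per letter whose
--     # first/last cell give that vehicle's start/end (X handled like any letter).
--     cells = [(c, r, ch) for r, line in enumerate(content) for c, ch in enumerate(line)]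
--     empty_squares = [(c, r) for c, r, ch in cells if not ch.isupper()]
--     letters = []
--     for _, _, ch in cells:
--         if ch.isupper() and ch not in letters:
--             letters.append(ch)
--
--     main_vehicle = [[-1, -1], [-1, -1]]
--     horizontal_vehicles = []
--     vertical_vehicles = []
--     for letter in letters:
--         occ = [(c, r) for c, r, ch in cells if ch == letter]
--         start, end = occ[0], occ[-1]
--         if letter == "X":
--             main_vehicle = [list(start), list(end)]
--         elif start[0] == end[0]:
--             vertical_vehicles.append((letter, start, end))
--         elif start[1] == end[1]:
--             horizontal_vehicles.append((letter, start, end))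
--     return main_vehicle, horizontal_vehicles, vertical_vehicles, empty_squares
-- ===== Notes on version B (the rewrite author's own statement) =====
-- stated objective: alternative
-- what changed: A streams over the board once maintaining a dict of first-seen/last-updated coordinate quadruples with X special-cased inside the scan; B instead flattens the board into a cell list and runs staged passes: one filter for empty squares, a first-occurrence scan for the distinct letters, then one filter pass per letter whose first and last cell give start/end, with X classified in the same loop.
import Mathlib
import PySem

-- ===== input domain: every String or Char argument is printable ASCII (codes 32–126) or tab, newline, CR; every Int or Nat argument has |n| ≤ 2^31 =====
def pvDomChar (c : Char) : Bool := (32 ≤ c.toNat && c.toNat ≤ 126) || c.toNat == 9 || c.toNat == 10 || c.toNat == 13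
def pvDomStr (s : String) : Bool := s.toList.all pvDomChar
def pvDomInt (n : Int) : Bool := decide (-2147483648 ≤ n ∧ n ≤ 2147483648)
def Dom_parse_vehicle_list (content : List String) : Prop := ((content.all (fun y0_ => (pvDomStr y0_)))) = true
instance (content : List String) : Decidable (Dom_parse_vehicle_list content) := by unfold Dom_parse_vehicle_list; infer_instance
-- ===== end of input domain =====

-- B replaces A's streaming first/last dict with staged passes over a flattened cell list
-- (empties by one filter, distinct letters by a first-occurrence scan, then one filter pass
-- per letter whose first/last cell give start/end); objective: alternative.

-- ===== PORT A =====
-- loop body of A's board scan, on one cell (col, row, letter); main_vehicle kept as a pair of pairs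
def pvAStepCell
    (st : ((Int × Int) × (Int × Int)) × PySem.Dict Char (Int × Int × Int × Int) × List (Int × Int))
    (x : Int × Int × Char) :
    ((Int × Int) × (Int × Int)) × PySem.Dict Char (Int × Int × Int × Int) × List (Int × Int) :=
  if PySem.Chars.isupper x.2.2 then
    if x.2.2 = 'X' then
      (((if st.1.1.1 = -1 then (x.1, x.2.1) else st.1.1), (x.1, x.2.1)), st.2.1, st.2.2)
    else if st.2.1.contains x.2.2 then
      (st.1,
       st.2.1.insert x.2.2
         ((st.2.1.getD x.2.2 (0, 0, 0, 0)).1, (st.2.1.getD x.2.2 (0, 0, 0, 0)).2.1, x.1, x.2.1),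
       st.2.2)
    else
      (st.1, st.2.1.insert x.2.2 (x.1, x.2.1, x.1, x.2.1), st.2.2)
  else (st.1, st.2.1, st.2.2 ++ [(x.1, x.2.1)])

-- loop body of A's categorisation loop over the vehicles dict
def pvAFinStep
    (hv : List (String × (Int × Int) × (Int × Int)) × List (String × (Int × Int) × (Int × Int)))
    (it : Char × Int × Int × Int × Int) :
    List (String × (Int × Int) × (Int × Int)) × List (String × (Int × Int) × (Int × Int)) :=
  if it.2.1 = it.2.2.2.1 then
    (hv.1, hv.2 ++ [(String.ofList [it.1], (it.2.1, it.2.2.1), (it.2.2.2.1, it.2.2.2.2))])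
  else if it.2.2.1 = it.2.2.2.2 then
    (hv.1 ++ [(String.ofList [it.1], (it.2.1, it.2.2.1), (it.2.2.2.1, it.2.2.2.2))], hv.2)
  else hv

def parse_vehicle_list (content : List String) :
    List (List Int) × (List (String × (Int × Int) × (Int × Int))) × (List (String × (Int × Int) × (Int × Int))) × (List (Int × Int)) :=
  let st := (PySem.List.enumerate content).foldl
    (fun st p => (PySem.List.enumerate p.2.toList).foldl (fun st q => pvAStepCell st (q.1, p.1, q.2)) st)
    ((((-1 : Int), (-1 : Int)), ((-1 : Int), (-1 : Int))), PySem.Dict.empty, [])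
  let hv := st.2.1.items.foldl pvAFinStep ([], [])
  ([[st.1.1.1, st.1.1.2], [st.1.2.1, st.1.2.2]], hv.1, hv.2, st.2.2)

-- ===== PORT B =====
-- B's flattened cell list: the comprehension [(c, r, ch) for r, line ... for c, ch ...]
def pvCells (content : List String) : List (Int × Int × Char) :=
  (PySem.List.enumerate content).flatMap
    (fun p => (PySem.List.enumerate p.2.toList).map (fun q => (q.1, p.1, q.2)))

-- B's per-letter occurrence comprehension [(c, r) for c, r, ch in cells if ch == letter]
def pvOcc (cells : List (Int × Int × Char)) (letter : Char) : List (Int × Int) :=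
  (cells.filter (fun x => x.2.2 == letter)).map (fun x => (x.1, x.2.1))

-- body of B's first-occurrence letter scan
def pvBLetterStep (acc : List Char) (x : Int × Int × Char) : List Char :=
  if PySem.Chars.isupper x.2.2 ∧ ¬ x.2.2 ∈ acc then acc ++ [x.2.2] else acc

-- body of B's classification loop over the distinct letters
def pvBClassify (cells : List (Int × Int × Char))
    (st : ((Int × Int) × (Int × Int)) × List (String × (Int × Int) × (Int × Int)) × List (String × (Int × Int) × (Int × Int)))
    (letter : Char) :
    ((Int × Int) × (Int × Int)) × List (String × (Int × Int) × (Int × Int)) × List (String × (Int × Int) × (Int × Int)) :=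
  let occ := pvOcc cells letter
  if letter = 'X' then ((occ.headD (0, 0), occ.getLastD (0, 0)), st.2)
  else if (occ.headD (0, 0)).1 = (occ.getLastD (0, 0)).1 then
    (st.1, st.2.1, st.2.2 ++ [(String.ofList [letter], occ.headD (0, 0), occ.getLastD (0, 0))])
  else if (occ.headD (0, 0)).2 = (occ.getLastD (0, 0)).2 then
    (st.1, st.2.1 ++ [(String.ofList [letter], occ.headD (0, 0), occ.getLastD (0, 0))], st.2.2)
  else st

def parse_vehicle_list_alt (content : List String) :
    List (List Int) × (List (String × (Int × Int) × (Int × Int))) × (List (String × (Int × Int) × (Int × Int))) × (List (Int × Int)) :=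
  let cells := pvCells content
  let empty_squares := (cells.filter (fun x => !(PySem.Chars.isupper x.2.2))).map (fun x => (x.1, x.2.1))
  let letters := cells.foldl pvBLetterStep []
  let fin := letters.foldl (pvBClassify cells)
    ((((-1 : Int), (-1 : Int)), ((-1 : Int), (-1 : Int))), [], [])
  ([[fin.1.1.1, fin.1.1.2], [fin.1.2.1, fin.1.2.2]], fin.2.1, fin.2.2, empty_squares)

-- ===== PRECONDITION & SPEC =====
def Spec_parse_vehicle_list (content : List String) (out : List (List Int) × (List (String × (Int × Int) × (Int × Int))) × (List (String × (Int × Int) × (Int × Int))) × (List (Int × Int))) : Prop := out = parse_vehicle_list_alt content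
instance (content : List String) (out : List (List Int) × (List (String × (Int × Int) × (Int × Int))) × (List (String × (Int × Int) × (Int × Int))) × (List (Int × Int))) : Decidable (Spec_parse_vehicle_list content out) := by unfold Spec_parse_vehicle_list; exact @instDecidableEqProd _ _ (by infer_instance) (@instDecidableEqProd _ _ (by infer_instance) (@instDecidableEqProd _ _ (by infer_instance) (by infer_instance))) out _

-- ===== CLAIM (what is proved, stated in full; the proofs are below) =====
def Claim_equal_parse_vehicle_list : Prop := ∀ (content : List String), Dom_parse_vehicle_list content → Spec_parse_vehicle_list content (parse_vehicle_list content)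

-- ===== LEMMAS AND PROOFS =====

-- proof-side grouping fold: a dict from each letter to its cell list, plus the empty squares
def pvGStep
    (st : PySem.Dict Char (List (Int × Int)) × List (Int × Int))
    (x : Int × Int × Char) :
    PySem.Dict Char (List (Int × Int)) × List (Int × Int) :=
  if PySem.Chars.isupper x.2.2 then (st.1.modify x.2.2 [] (· ++ [(x.1, x.2.1)]), st.2)
  else (st.1, st.2 ++ [(x.1, x.2.1)])

-- proof-side classification step on a (letter, cells) pair
def pvHStep
    (acc : ((Int × Int) × (Int × Int)) × List (String × (Int × Int) × (Int × Int)) × List (String × (Int × Int) × (Int × Int)))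
    (it : Char × List (Int × Int)) :
    ((Int × Int) × (Int × Int)) × List (String × (Int × Int) × (Int × Int)) × List (String × (Int × Int) × (Int × Int)) :=
  if it.1 = 'X' then ((it.2.headD (0, 0), it.2.getLastD (0, 0)), acc.2)
  else if (it.2.headD (0, 0)).1 = (it.2.getLastD (0, 0)).1 then
    (acc.1, acc.2.1, acc.2.2 ++ [(String.ofList [it.1], it.2.headD (0, 0), it.2.getLastD (0, 0))])
  else if (it.2.headD (0, 0)).2 = (it.2.getLastD (0, 0)).2 then
    (acc.1, acc.2.1 ++ [(String.ofList [it.1], it.2.headD (0, 0), it.2.getLastD (0, 0))], acc.2.2)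
  else acc

-- A's dict entry determined by a group of cells: (first.col, first.row, last.col, last.row)
def pvF (p : Char × List (Int × Int)) : Char × Int × Int × Int × Int :=
  (p.1, (p.2.headD (0, 0)).1, (p.2.headD (0, 0)).2, (p.2.getLastD (0, 0)).1, (p.2.getLastD (0, 0)).2)

def pvAbsMain (g : PySem.Dict Char (List (Int × Int))) : (Int × Int) × (Int × Int) :=
  match g.get? 'X' with
  | none => ((-1, -1), (-1, -1))
  | some cs => (cs.headD (0, 0), cs.getLastD (0, 0))

def pvAbsDict (g : PySem.Dict Char (List (Int × Int))) : PySem.Dict Char (Int × Int × Int × Int) :=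
  PySem.Dict.mk ((g.items.filter (fun p => p.1 != 'X')).map pvF)

def pvWF (g : PySem.Dict Char (List (Int × Int))) : Prop :=
  g.keys.Nodup ∧ (∀ p ∈ g.items, p.2 ≠ [] ∧ ∀ q ∈ p.2, 0 ≤ q.1)

lemma pv_foldl_flatMap {σ α β : Type} (l : List α) (h : α → List β) (g : σ → β → σ) (s : σ) :
    l.foldl (fun s x => (h x).foldl g s) s = (l.flatMap h).foldl g s := by
  induction l generalizing s with
  | nil => rfl
  | cons a l ih => simp [List.flatMap_cons, List.foldl_append, ih]

lemma pv_foldl_cells {σ : Type} (g : σ → Int × Int × Char → σ) (content : List String) (s : σ) :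
    (PySem.List.enumerate content).foldl
      (fun st p => (PySem.List.enumerate p.2.toList).foldl (fun st q => g st (q.1, p.1, q.2)) st) s
    = (pvCells content).foldl g s := by
  rw [pvCells, ← pv_foldl_flatMap]
  congr 1
  funext st p
  rw [List.foldl_map]

lemma pv_cells_nonneg (content : List String) : ∀ x ∈ pvCells content, 0 ≤ x.1 := by
  intro x hx
  rw [pvCells, List.mem_flatMap] at hx
  obtain ⟨p, _, hx⟩ := hx
  rw [List.mem_map] at hx
  obtain ⟨q, hq, rfl⟩ := hx
  rw [PySem.List.mem_enumerate_iff] at hq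
  obtain ⟨k, hk, rfl⟩ := hq
  simp

lemma pv_filter_map_updX (v : List (Int × Int)) (G : List (Char × List (Int × Int))) :
    (G.map (fun p => if p.1 == 'X' then ('X', v) else p)).filter (fun p => p.1 != 'X')
      = G.filter (fun p => p.1 != 'X') := by
  induction G with
  | nil => rfl
  | cons p G ih => by_cases h : p.1 = 'X' <;> simp [h] <;> simpa using ih

lemma pv_find_abs (G : List (Char × List (Int × Int))) (ch : Char) (hch : ch ≠ 'X') :
    ((G.filter (fun p => p.1 != 'X')).map pvF).find? (fun p => p.1 == ch)
      = (G.find? (fun p => p.1 == ch)).map pvF := by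
  induction G with
  | nil => rfl
  | cons p G ih =>
    by_cases h2 : p.1 = 'X'
    · have h : p.1 ≠ ch := by rw [h2]; exact fun hh => hch hh.symm
      rw [List.filter_cons_of_neg (by simp [h2]), List.find?_cons_of_neg (by simp [h]), ih]
    · rw [List.filter_cons_of_pos (by simp [h2]), List.map_cons]
      by_cases h : p.1 = ch
      · rw [List.find?_cons_of_pos (by simp [pvF, h]), List.find?_cons_of_pos (by simp [h])]
        rfl
      · rw [List.find?_cons_of_neg (by simp [pvF, h]), List.find?_cons_of_neg (by simp [h]), ih]

lemma pv_filter_map_upd (G : List (Char × List (Int × Int))) (ch : Char) (hch : ch ≠ 'X')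
    (vB : List (Int × Int)) (vA : Int × Int × Int × Int) (hFA : pvF (ch, vB) = (ch, vA)) :
    ((G.map (fun p => if p.1 == ch then (ch, vB) else p)).filter (fun p => p.1 != 'X')).map pvF
      = ((G.filter (fun p => p.1 != 'X')).map pvF).map (fun p => if p.1 == ch then (ch, vA) else p) := by
  induction G with
  | nil => rfl
  | cons p G ih =>
    simp only [List.map_cons]
    by_cases h : p.1 = ch
    · have hn : p.1 ≠ 'X' := by rw [h]; exact hch
      rw [if_pos (show (p.1 == ch) = true by simp [h])]
      rw [List.filter_cons_of_pos (by simp [hch]), List.map_cons, hFA,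
        List.filter_cons_of_pos (by simp [hn]), List.map_cons, List.map_cons,
        if_pos (show ((pvF p).1 == ch) = true by simp [pvF, h]), ih]
    · rw [if_neg (show ¬ (p.1 == ch) = true by simp [h])]
      by_cases h2 : p.1 = 'X'
      · rw [List.filter_cons_of_neg (by simp [h2]), List.filter_cons_of_neg (by simp [h2]), ih]
      · rw [List.filter_cons_of_pos (by simp [h2]), List.filter_cons_of_pos (by simp [h2]),
          List.map_cons, List.map_cons, List.map_cons,
          if_neg (show ¬ ((pvF p).1 == ch) = true by simp [pvF, h]), ih]

lemma pv_absdict_get? (g : PySem.Dict Char (List (Int × Int))) (ch : Char) (hch : ch ≠ 'X') :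
    (pvAbsDict g).get? ch = (g.get? ch).map (fun cs => (pvF (ch, cs)).2) := by
  show (((g.items.filter (fun p => p.1 != 'X')).map pvF).find? (fun p => p.1 == ch)).map (·.2)
      = ((g.items.find? (fun p => p.1 == ch)).map (·.2)).map (fun cs => (pvF (ch, cs)).2)
  rw [pv_find_abs g.items ch hch]
  cases hf : g.items.find? (fun p => p.1 == ch) with
  | none => rfl
  | some p => simp [pvF]

lemma pv_abscontains (g : PySem.Dict Char (List (Int × Int))) (ch : Char) (hch : ch ≠ 'X') :
    (pvAbsDict g).contains ch = g.contains ch := by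
  rw [PySem.Dict.contains_eq_isSome_get?, PySem.Dict.contains_eq_isSome_get?,
    pv_absdict_get? g ch hch]
  cases g.get? ch <;> rfl

lemma pv_getD_mem_wf (g : PySem.Dict Char (List (Int × Int))) (hwf : pvWF g) (ch : Char) :
    ∀ q ∈ g.getD ch [], 0 ≤ q.1 := by
  intro q hq
  rw [PySem.Dict.getD_eq_get?_getD] at hq
  cases hg : g.get? ch with
  | none => rw [hg] at hq; simp at hq
  | some cs =>
    rw [hg] at hq
    exact (hwf.2 _ (PySem.Dict.mem_items_of_get?_eq_some g hg)).2 q hq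

lemma pv_step_abs (st : PySem.Dict Char (List (Int × Int)) × List (Int × Int))
    (x : Int × Int × Char) (hwf : pvWF st.1) (hx : 0 ≤ x.1) :
    pvAStepCell (pvAbsMain st.1, pvAbsDict st.1, st.2) x
      = (pvAbsMain (pvGStep st x).1, pvAbsDict (pvGStep st x).1, (pvGStep st x).2) := by
  obtain ⟨g, e⟩ := st
  obtain ⟨c, r, ch⟩ := x
  by_cases hu : PySem.Chars.isupper ch
  · have hmod : (pvGStep (g, e) (c, r, ch)).1 = g.insert ch (g.getD ch [] ++ [(c, r)]) := by
      simp [pvGStep, hu, PySem.Dict.modify]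
    have hee : (pvGStep (g, e) (c, r, ch)).2 = e := by simp [pvGStep, hu]
    by_cases hX : ch = 'X'
    · subst hX
      cases hg : g.get? 'X' with
      | none =>
        have hc : g.contains 'X' = false := by rw [PySem.Dict.contains_eq_isSome_get?, hg]; rfl
        have hgd : g.getD 'X' [] = [] := by rw [PySem.Dict.getD_eq_get?_getD, hg]; rfl
        have hm : pvAbsMain g = ((-1, -1), (-1, -1)) := by simp [pvAbsMain, hg]
        have hm' : pvAbsMain (pvGStep (g, e) (c, r, 'X')).1 = ((c, r), (c, r)) := by
          rw [hmod]; simp [pvAbsMain, PySem.Dict.get?_insert_self, hgd]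
        have hd' : pvAbsDict (pvGStep (g, e) (c, r, 'X')).1 = pvAbsDict g := by
          rw [hmod]
          apply PySem.Dict.ext
          show ((g.insert 'X' (g.getD 'X' [] ++ [(c, r)])).items.filter (fun p => p.1 != 'X')).map pvF
              = (g.items.filter (fun p => p.1 != 'X')).map pvF
          rw [PySem.Dict.items_insert_of_not_contains _ _ hc, List.filter_append]
          have hnilf : ([('X', g.getD 'X' [] ++ [(c, r)])].filter (fun p => p.1 != 'X')) = [] := by
            simp
          rw [hnilf, List.append_nil]
        rw [hm', hd', hee]
        simp [pvAStepCell, hu, hm]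
      | some cs =>
        have hc : g.contains 'X' = true := by rw [PySem.Dict.contains_eq_isSome_get?, hg]; rfl
        have hmem := PySem.Dict.mem_items_of_get?_eq_some g hg
        have hcs := hwf.2 _ hmem
        have hne : cs ≠ [] := hcs.1
        have hgd : g.getD 'X' [] = cs := by rw [PySem.Dict.getD_eq_get?_getD, hg]; rfl
        have hhead : 0 ≤ (cs.headD (0, 0)).1 := by
          cases cs with
          | nil => exact absurd rfl hne
          | cons a t => exact (hcs.2 a (by simp))
        have hm : pvAbsMain g = (cs.headD (0, 0), cs.getLastD (0, 0)) := by simp [pvAbsMain, hg]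
        have hguard : ¬ ((cs.headD (0, 0)).1 = -1) := by omega
        have hccc : cs.head?.getD ((c, r) : Int × Int) = cs.head?.getD ((0, 0) : Int × Int) := by
          cases cs with
          | nil => exact absurd rfl hne
          | cons a t => rfl
        have hl : (cs ++ [(c, r)]).getLastD (0, 0) = (c, r) := List.getLastD_concat
        have hm' : pvAbsMain (pvGStep (g, e) (c, r, 'X')).1 = (cs.headD (0, 0), (c, r)) := by
          rw [hmod]
          simp [pvAbsMain, PySem.Dict.get?_insert_self, hgd, hccc]
        have hd' : pvAbsDict (pvGStep (g, e) (c, r, 'X')).1 = pvAbsDict g := by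
          rw [hmod]
          apply PySem.Dict.ext
          show ((g.insert 'X' (g.getD 'X' [] ++ [(c, r)])).items.filter (fun p => p.1 != 'X')).map pvF
              = (g.items.filter (fun p => p.1 != 'X')).map pvF
          rw [PySem.Dict.items_insert_of_contains _ _ hc, pv_filter_map_updX]
        rw [hm', hd', hee]
        simp [pvAStepCell, hu, hm]
        intro h
        exfalso
        have hhead' : 0 ≤ (cs.head?.getD ((0, 0) : Int × Int)).1 := by simpa using hhead
        omega
    · have hXs : ('X' : Char) ≠ ch := fun h => hX h.symm
      have hm' : pvAbsMain (pvGStep (g, e) (c, r, ch)).1 = pvAbsMain g := by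
        rw [hmod]; simp [pvAbsMain, PySem.Dict.get?_insert_of_ne _ _ hXs]
      cases hg : g.get? ch with
      | none =>
        have hc : g.contains ch = false := by rw [PySem.Dict.contains_eq_isSome_get?, hg]; rfl
        have hcA : (pvAbsDict g).contains ch = false := by rw [pv_abscontains g ch hX]; exact hc
        have hgd : g.getD ch [] = [] := by rw [PySem.Dict.getD_eq_get?_getD, hg]; rfl
        have hd' : pvAbsDict (pvGStep (g, e) (c, r, ch)).1
            = (pvAbsDict g).insert ch (c, r, c, r) := by
          rw [hmod, hgd, List.nil_append]
          apply PySem.Dict.ext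
          rw [PySem.Dict.items_insert_of_not_contains _ _ hcA]
          show ((g.insert ch [(c, r)]).items.filter (fun p => p.1 != 'X')).map pvF
              = (g.items.filter (fun p => p.1 != 'X')).map pvF ++ [(ch, (c, r, c, r))]
          rw [PySem.Dict.items_insert_of_not_contains _ _ hc, List.filter_append, List.map_append]
          congr 1
          show ([(ch, [(c, r)])].filter (fun p => p.1 != 'X')).map pvF = [(ch, (c, r, c, r))]
          simp [pvF, hX]
        rw [hm', hd', hee]
        simp [pvAStepCell, hu, hX, hcA]
      | some cs =>
        have hc : g.contains ch = true := by rw [PySem.Dict.contains_eq_isSome_get?, hg]; rfl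
        have hcA : (pvAbsDict g).contains ch = true := by rw [pv_abscontains g ch hX]; exact hc
        have hne : cs ≠ [] := (hwf.2 _ (PySem.Dict.mem_items_of_get?_eq_some g hg)).1
        have hgd : g.getD ch [] = cs := by rw [PySem.Dict.getD_eq_get?_getD, hg]; rfl
        have habsgetD : (pvAbsDict g).getD ch (0, 0, 0, 0) = (pvF (ch, cs)).2 := by
          rw [PySem.Dict.getD_eq_get?_getD, pv_absdict_get? g ch hX, hg]; rfl
        have hccc2 : cs.head?.getD ((c, r) : Int × Int) = cs.head?.getD ((0, 0) : Int × Int) := by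
          cases cs with
          | nil => exact absurd rfl hne
          | cons a t => rfl
        have hFA : pvF (ch, cs ++ [(c, r)])
            = (ch, (cs.headD (0, 0)).1, (cs.headD (0, 0)).2, c, r) := by
          simp [pvF, hccc2]
        have hd' : pvAbsDict (pvGStep (g, e) (c, r, ch)).1
            = (pvAbsDict g).insert ch ((cs.headD (0, 0)).1, (cs.headD (0, 0)).2, c, r) := by
          rw [hmod]
          apply PySem.Dict.ext
          rw [PySem.Dict.items_insert_of_contains _ _ hcA]
          have hitems := PySem.Dict.items_insert_of_contains g (g.getD ch [] ++ [(c, r)]) hc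
          show ((g.insert ch (g.getD ch [] ++ [(c, r)])).items.filter (fun p => p.1 != 'X')).map pvF
              = ((g.items.filter (fun p => p.1 != 'X')).map pvF).map
                  (fun p => if p.1 == ch then (ch, (cs.headD (0, 0)).1, (cs.headD (0, 0)).2, c, r) else p)
          rw [hitems, hgd]
          exact pv_filter_map_upd g.items ch hX (cs ++ [(c, r)]) _ hFA
        rw [hm', hd', hee]
        simp [pvAStepCell, hu, hX, hcA, habsgetD, pvF]
  · simp [pvAStepCell, pvGStep, hu]

lemma pv_wf_step (st : PySem.Dict Char (List (Int × Int)) × List (Int × Int))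
    (x : Int × Int × Char) (hwf : pvWF st.1) (hx : 0 ≤ x.1) :
    pvWF (pvGStep st x).1 := by
  obtain ⟨g, e⟩ := st
  obtain ⟨c, r, ch⟩ := x
  by_cases hu : PySem.Chars.isupper ch
  · have hmod : (pvGStep (g, e) (c, r, ch)).1 = g.insert ch (g.getD ch [] ++ [(c, r)]) := by
      simp [pvGStep, hu, PySem.Dict.modify]
    rw [hmod]
    constructor
    · exact PySem.Dict.nodup_keys_insert _ _ _ hwf.1
    · intro p hp
      rw [PySem.Dict.mem_items_insert] at hp
      rcases hp with hp | hp
      · subst hp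
        refine ⟨by simp, ?_⟩
        intro q hq
        rcases List.mem_append.mp hq with hq | hq
        · exact pv_getD_mem_wf g hwf ch q hq
        · simp at hq; subst hq; exact hx
      · exact hwf.2 _ hp.1
  · simpa [pvGStep, hu] using hwf

lemma pv_fold_abs (L : List (Int × Int × Char)) (hL : ∀ x ∈ L, 0 ≤ x.1)
    (st : PySem.Dict Char (List (Int × Int)) × List (Int × Int)) (h : pvWF st.1) :
    L.foldl pvAStepCell (pvAbsMain st.1, pvAbsDict st.1, st.2)
      = (pvAbsMain (L.foldl pvGStep st).1, pvAbsDict (L.foldl pvGStep st).1,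
         (L.foldl pvGStep st).2)
    ∧ pvWF (L.foldl pvGStep st).1 := by
  induction L generalizing st with
  | nil => exact ⟨rfl, h⟩
  | cons x L ih =>
    have hx : 0 ≤ x.1 := hL x (by simp)
    have hstep := pv_step_abs st x h hx
    have hwf := pv_wf_step st x h hx
    have := ih (fun y hy => hL y (by simp [hy])) (pvGStep st x) hwf
    simpa [hstep] using this

def pvMainUpd (L : List (Char × List (Int × Int))) (m0 : (Int × Int) × (Int × Int)) :
    (Int × Int) × (Int × Int) :=
  L.foldl (fun m p => if p.1 = 'X' then (p.2.headD (0, 0), p.2.getLastD (0, 0)) else m) m0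

lemma pv_mainUpd_noX (L : List (Char × List (Int × Int))) (h : ∀ q ∈ L, q.1 ≠ 'X')
    (m0 : (Int × Int) × (Int × Int)) : pvMainUpd L m0 = m0 := by
  induction L generalizing m0 with
  | nil => rfl
  | cons p L ih =>
    have hp : p.1 ≠ 'X' := h p (by simp)
    simp [pvMainUpd, List.foldl_cons, hp]
    simpa [pvMainUpd] using ih (fun q hq => h q (by simp [hq])) m0

lemma pv_finstep_nonX (l : Char) (cs : List (Int × Int)) (hp : l ≠ 'X')
    (m : (Int × Int) × (Int × Int))
    (hv : List (String × (Int × Int) × (Int × Int)) × List (String × (Int × Int) × (Int × Int))) :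
    pvHStep (m, hv) (l, cs) = (m, pvAFinStep hv (pvF (l, cs))) := by
  rcases hs : cs.headD (0, 0) with ⟨sx, sy⟩
  rcases he : cs.getLastD (0, 0) with ⟨ex, ey⟩
  simp only [pvHStep, pvAFinStep, pvF, if_neg hp, hs, he]
  split_ifs <;> rfl

lemma pv_fin_eq (L : List (Char × List (Int × Int))) (m0 : (Int × Int) × (Int × Int))
    (hv : List (String × (Int × Int) × (Int × Int)) × List (String × (Int × Int) × (Int × Int))) :
    L.foldl pvHStep (m0, hv)
      = (pvMainUpd L m0, ((L.filter (fun p => p.1 != 'X')).map pvF).foldl pvAFinStep hv) := by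
  induction L generalizing m0 hv with
  | nil => rfl
  | cons p L ih =>
    obtain ⟨l, cs⟩ := p
    by_cases hp : l = 'X'
    · subst hp
      have hB : pvHStep (m0, hv) ('X', cs) = ((cs.headD (0, 0), cs.getLastD (0, 0)), hv) := by
        simp [pvHStep]
      have hm : pvMainUpd (('X', cs) :: L) m0 = pvMainUpd L (cs.headD (0, 0), cs.getLastD (0, 0)) := by
        simp [pvMainUpd]
      rw [List.foldl_cons, hB, hm]
      simpa using ih (cs.headD (0, 0), cs.getLastD (0, 0)) hv
    · have hm : pvMainUpd ((l, cs) :: L) m0 = pvMainUpd L m0 := by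
        simp [pvMainUpd, hp]
      rw [List.foldl_cons, pv_finstep_nonX l cs hp m0 hv, hm]
      have hfil : ((l, cs) :: L).filter (fun p => p.1 != 'X') = (l, cs) :: L.filter (fun p => p.1 != 'X') := by
        simp [hp]
      rw [hfil, List.map_cons, List.foldl_cons]
      exact ih m0 (pvAFinStep hv (pvF (l, cs)))

lemma pv_mainUpd_eq (L : List (Char × List (Int × Int))) (hL : (L.map (·.1)).Nodup)
    (m0 : (Int × Int) × (Int × Int)) :
    pvMainUpd L m0
      = match L.find? (fun p => p.1 == 'X') with
        | none => m0
        | some p => (p.2.headD (0, 0), p.2.getLastD (0, 0)) := by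
  induction L generalizing m0 with
  | nil => rfl
  | cons p L ih =>
    obtain ⟨l, cs⟩ := p
    rw [List.map_cons, List.nodup_cons] at hL
    by_cases hp : l = 'X'
    · subst hp
      have hnoX : ∀ q ∈ L, q.1 ≠ 'X' := by
        intro q hq h
        exact hL.1 (by rw [← h]; exact List.mem_map.mpr ⟨q, hq, rfl⟩)
      have h2 := pv_mainUpd_noX L hnoX (cs.headD (0, 0), cs.getLastD (0, 0))
      have hm : pvMainUpd (('X', cs) :: L) m0 = pvMainUpd L (cs.headD (0, 0), cs.getLastD (0, 0)) := by
        simp [pvMainUpd]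
      rw [hm, h2]
      simp
    · have hm : pvMainUpd ((l, cs) :: L) m0 = pvMainUpd L m0 := by
        simp [pvMainUpd, hp]
      rw [hm, ih hL.2 m0]
      simp [hp]

-- ===== lemmas relating B's staged passes to the grouping fold =====

lemma pv_find_map_fst {β : Type} (letters : List Char) (f : Char → β) (ch : Char) :
    ((letters.map (fun l => (l, f l))).find? (fun p => p.1 == ch))
      = (letters.find? (fun l => l == ch)).map (fun l => (l, f l)) := by
  induction letters with
  | nil => rfl
  | cons a t ih =>
    by_cases h : a = ch
    · subst h; simp
    · rw [List.map_cons, List.find?_cons_of_neg (by simp [h]),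
        List.find?_cons_of_neg (by simp [h]), ih]

lemma pv_find_self (letters : List Char) (ch : Char) (h : ch ∈ letters) :
    letters.find? (fun l => l == ch) = some ch := by
  induction letters with
  | nil => simp at h
  | cons a t ih =>
    by_cases ha : a = ch
    · subst ha; simp
    · rw [List.find?_cons_of_neg (by simp [ha])]
      rcases List.mem_cons.mp h with h | h
      · exact absurd h.symm ha
      · exact ih h

lemma pv_find_not_mem (letters : List Char) (ch : Char) (h : ch ∉ letters) :
    letters.find? (fun l => l == ch) = none := by
  rw [List.find?_eq_none]
  intro x hx
  simp only [beq_iff_eq]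
  exact fun e => h (e ▸ hx)

lemma pv_mk_get? {β : Type} (letters : List Char) (f : Char → β) (ch : Char) :
    (PySem.Dict.mk (letters.map (fun l => (l, f l)))).get? ch
      = (letters.find? (fun l => l == ch)).map f := by
  show (((letters.map (fun l => (l, f l))).find? (fun p => p.1 == ch)).map (·.2))
      = (letters.find? (fun l => l == ch)).map f
  rw [pv_find_map_fst]
  cases letters.find? (fun l => l == ch) <;> rfl

-- the grouping fold, characterised by B's staged passes
lemma pv_groups_eq (L : List (Int × Int × Char)) :
    (∀ l ∈ L.foldl pvBLetterStep [], PySem.Chars.isupper l = true) ∧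
    (∀ ch, PySem.Chars.isupper ch = true → ch ∉ L.foldl pvBLetterStep [] → pvOcc L ch = []) ∧
    L.foldl pvGStep (PySem.Dict.empty, [])
      = (PySem.Dict.mk ((L.foldl pvBLetterStep []).map (fun l => (l, pvOcc L l))),
         (L.filter (fun x => !(PySem.Chars.isupper x.2.2))).map (fun x => (x.1, x.2.1))) := by
  induction L using List.reverseRecOn with
  | nil => exact ⟨by simp, fun ch _ _ => rfl, rfl⟩
  | append_singleton L x ih =>
    obtain ⟨c, r, ch⟩ := x
    obtain ⟨hup, hnm, heq⟩ := ih
    have hlet : (L ++ [(c, r, ch)]).foldl pvBLetterStep []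
        = pvBLetterStep (L.foldl pvBLetterStep []) (c, r, ch) := by
      rw [List.foldl_append]; rfl
    have hocc : ∀ d, pvOcc (L ++ [(c, r, ch)]) d
        = pvOcc L d ++ (if ch == d then [(c, r)] else []) := by
      intro d
      by_cases h : ch = d <;> simp [pvOcc, List.filter_append, h]
    have hfold : (L ++ [(c, r, ch)]).foldl pvGStep (PySem.Dict.empty, [])
        = pvGStep (L.foldl pvGStep (PySem.Dict.empty, [])) (c, r, ch) := by
      rw [List.foldl_append]; rfl
    set letters := L.foldl pvBLetterStep [] with hlets
    have hocc_ne : ∀ d, ch ≠ d → pvOcc (L ++ [(c, r, ch)]) d = pvOcc L d := by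
      intro d hd
      rw [hocc d, if_neg (by simpa using hd), List.append_nil]
    by_cases hu : PySem.Chars.isupper ch
    · by_cases hm : ch ∈ letters
      · -- existing letter: letters unchanged, its group gains a cell
        have hlet' : (L ++ [(c, r, ch)]).foldl pvBLetterStep [] = letters := by
          rw [hlet]; simp [pvBLetterStep, hu, hm]
        refine ⟨by rw [hlet']; exact hup, ?_, ?_⟩
        · intro d hd hdm
          rw [hlet'] at hdm
          rw [hocc_ne d (fun e => hdm (e ▸ hm))]
          exact hnm d hd hdm
        · rw [hfold, heq, hlet']
          have hget : (PySem.Dict.mk (letters.map (fun l => (l, pvOcc L l)))).getD ch []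
              = pvOcc L ch := by
            rw [PySem.Dict.getD_eq_get?_getD, pv_mk_get?, pv_find_self letters ch hm]; rfl
          have hcont : (PySem.Dict.mk (letters.map (fun l => (l, pvOcc L l)))).contains ch = true := by
            rw [PySem.Dict.contains_eq_isSome_get?, pv_mk_get?, pv_find_self letters ch hm]; rfl
          have hmod : pvGStep
              (PySem.Dict.mk (letters.map (fun l => (l, pvOcc L l))),
               (L.filter (fun x => !(PySem.Chars.isupper x.2.2))).map (fun x => (x.1, x.2.1)))
              (c, r, ch)
              = ((PySem.Dict.mk (letters.map (fun l => (l, pvOcc L l)))).insert ch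
                   (pvOcc L ch ++ [(c, r)]),
                 (L.filter (fun x => !(PySem.Chars.isupper x.2.2))).map (fun x => (x.1, x.2.1))) := by
            simp [pvGStep, hu, PySem.Dict.modify, hget]
          rw [hmod]
          have hemp : ((L ++ [(c, r, ch)]).filter (fun x => !(PySem.Chars.isupper x.2.2))).map
              (fun x => (x.1, x.2.1))
              = (L.filter (fun x => !(PySem.Chars.isupper x.2.2))).map (fun x => (x.1, x.2.1)) := by
            simp [List.filter_append, hu]
          rw [hemp]
          refine Prod.ext ?_ rfl
          apply PySem.Dict.ext
          rw [PySem.Dict.items_insert_of_contains _ _ hcont]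
          show (letters.map (fun l => (l, pvOcc L l))).map
              (fun p => if p.1 == ch then (ch, pvOcc L ch ++ [(c, r)]) else p)
              = letters.map (fun l => (l, pvOcc (L ++ [(c, r, ch)]) l))
          rw [List.map_map]
          apply List.map_congr_left
          intro l hl
          by_cases hlch : l = ch
          · subst hlch
            simp only [Function.comp_apply, beq_self_eq_true, if_pos]
            rw [hocc l, if_pos (by simp)]
          · simp only [Function.comp_apply]
            rw [if_neg (by simp [hlch]), hocc_ne l (fun e => hlch e.symm)]
      · -- new letter: appended to letters, fresh singleton group
        have hlet' : (L ++ [(c, r, ch)]).foldl pvBLetterStep [] = letters ++ [ch] := by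
          rw [hlet]; simp [pvBLetterStep, hu, hm]
        have hoccL : pvOcc L ch = [] := hnm ch hu hm
        refine ⟨?_, ?_, ?_⟩
        · rw [hlet']
          intro l hl
          rcases List.mem_append.mp hl with hl | hl
          · exact hup l hl
          · simp at hl; subst hl; exact hu
        · intro d hd hdm
          rw [hlet'] at hdm
          have hdch : d ≠ ch := fun e => hdm (by simp [e])
          have hdlet : d ∉ letters := fun hmem => hdm (List.mem_append.mpr (Or.inl hmem))
          rw [hocc_ne d (fun e => hdch e.symm)]
          exact hnm d hd hdlet
        · rw [hfold, heq, hlet']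
          have hget : (PySem.Dict.mk (letters.map (fun l => (l, pvOcc L l)))).get? ch = none := by
            rw [pv_mk_get?, pv_find_not_mem letters ch hm]; rfl
          have hcont : (PySem.Dict.mk (letters.map (fun l => (l, pvOcc L l)))).contains ch
              = false := by
            rw [PySem.Dict.contains_eq_isSome_get?, hget]; rfl
          have hgetD : (PySem.Dict.mk (letters.map (fun l => (l, pvOcc L l)))).getD ch [] = [] := by
            rw [PySem.Dict.getD_eq_get?_getD, hget]; rfl
          have hmod : pvGStep
              (PySem.Dict.mk (letters.map (fun l => (l, pvOcc L l))),
               (L.filter (fun x => !(PySem.Chars.isupper x.2.2))).map (fun x => (x.1, x.2.1)))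
              (c, r, ch)
              = ((PySem.Dict.mk (letters.map (fun l => (l, pvOcc L l)))).insert ch [(c, r)],
                 (L.filter (fun x => !(PySem.Chars.isupper x.2.2))).map (fun x => (x.1, x.2.1))) := by
            simp [pvGStep, hu, PySem.Dict.modify, hgetD]
          rw [hmod]
          have hemp : ((L ++ [(c, r, ch)]).filter (fun x => !(PySem.Chars.isupper x.2.2))).map
              (fun x => (x.1, x.2.1))
              = (L.filter (fun x => !(PySem.Chars.isupper x.2.2))).map (fun x => (x.1, x.2.1)) := by
            simp [List.filter_append, hu]
          rw [hemp]
          refine Prod.ext ?_ rfl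
          apply PySem.Dict.ext
          rw [PySem.Dict.items_insert_of_not_contains _ _ hcont]
          show letters.map (fun l => (l, pvOcc L l)) ++ [(ch, [(c, r)])]
              = (letters ++ [ch]).map (fun l => (l, pvOcc (L ++ [(c, r, ch)]) l))
          rw [List.map_append]
          congr 1
          · apply List.map_congr_left
            intro l hl
            have hlch : l ≠ ch := fun e => hm (e ▸ hl)
            rw [hocc_ne l (fun e => hlch e.symm)]
          · rw [List.map_singleton, hocc ch, if_pos (by simp), hoccL, List.nil_append]
    · -- non-uppercase cell: empty square
      have hlet' : (L ++ [(c, r, ch)]).foldl pvBLetterStep [] = letters := by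
        rw [hlet]; simp [pvBLetterStep, hu]
      refine ⟨by rw [hlet']; exact hup, ?_, ?_⟩
      · intro d hd hdm
        rw [hlet'] at hdm
        have hdch : ch ≠ d := fun e => hu (by rw [e]; exact hd)
        rw [hocc_ne d hdch]
        exact hnm d hd hdm
      · rw [hfold, heq, hlet']
        have hstep : pvGStep
            (PySem.Dict.mk (letters.map (fun l => (l, pvOcc L l))),
             (L.filter (fun x => !(PySem.Chars.isupper x.2.2))).map (fun x => (x.1, x.2.1)))
            (c, r, ch)
            = (PySem.Dict.mk (letters.map (fun l => (l, pvOcc L l))),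
               (L.filter (fun x => !(PySem.Chars.isupper x.2.2))).map (fun x => (x.1, x.2.1))
                 ++ [(c, r)]) := by
          simp [pvGStep, hu]
        rw [hstep]
        have hemp : ((L ++ [(c, r, ch)]).filter (fun x => !(PySem.Chars.isupper x.2.2))).map
            (fun x => (x.1, x.2.1))
            = (L.filter (fun x => !(PySem.Chars.isupper x.2.2))).map (fun x => (x.1, x.2.1))
              ++ [(c, r)] := by
          simp [List.filter_append, hu]
        rw [hemp]
        refine Prod.ext ?_ rfl
        apply PySem.Dict.ext
        show letters.map (fun l => (l, pvOcc L l))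
            = letters.map (fun l => (l, pvOcc (L ++ [(c, r, ch)]) l))
        apply List.map_congr_left
        intro l hl
        have hlch : ch ≠ l := fun e => hu (by rw [e]; exact hup l hl)
        rw [hocc_ne l hlch]

-- B's classification fold is the proof-side fold over (letter, occurrences) pairs
lemma pv_foldl_classify (cells : List (Int × Int × Char)) (letters : List Char)
    (st : ((Int × Int) × (Int × Int)) × List (String × (Int × Int) × (Int × Int)) × List (String × (Int × Int) × (Int × Int))) :
    letters.foldl (pvBClassify cells) st
      = (letters.map (fun l => (l, pvOcc cells l))).foldl pvHStep st := by
  rw [List.foldl_map]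
  rfl

-- ===== VERDICT (by name: the statement is the Claim_ definition above) =====
theorem parse_vehicle_list_spec : Claim_equal_parse_vehicle_list := by
  intro content _hdom
  show parse_vehicle_list content = parse_vehicle_list_alt content
  have h0 : pvWF (PySem.Dict.empty : PySem.Dict Char (List (Int × Int))) := by
    constructor
    · simp [PySem.Dict.keys, PySem.Dict.empty]
    · intro p hp
      simp [PySem.Dict.empty] at hp
  obtain ⟨hfold, hwf⟩ := pv_fold_abs (pvCells content) (pv_cells_nonneg content)
    (PySem.Dict.empty, []) h0
  obtain ⟨hup, hnm, hgeq⟩ := pv_groups_eq (pvCells content)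
  set letters := (pvCells content).foldl pvBLetterStep [] with hlets
  set M := letters.map (fun l => (l, pvOcc (pvCells content) l)) with hM
  set E := ((pvCells content).filter (fun x => !(PySem.Chars.isupper x.2.2))).map
    (fun x => (x.1, x.2.1)) with hE
  rw [hgeq] at hfold hwf
  unfold parse_vehicle_list parse_vehicle_list_alt
  rw [pv_foldl_cells]
  have hfold' : (pvCells content).foldl pvAStepCell
      (((((-1 : Int), (-1 : Int)), ((-1 : Int), (-1 : Int))) :
          ((Int × Int) × (Int × Int))), (PySem.Dict.empty : PySem.Dict Char (Int × Int × Int × Int)),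
        ([] : List (Int × Int)))
      = (pvAbsMain (PySem.Dict.mk M), pvAbsDict (PySem.Dict.mk M), E) := by
    rw [show (((((-1 : Int), (-1 : Int)), ((-1 : Int), (-1 : Int))) :
          ((Int × Int) × (Int × Int))), (PySem.Dict.empty : PySem.Dict Char (Int × Int × Int × Int)),
        ([] : List (Int × Int)))
      = (pvAbsMain (PySem.Dict.empty : PySem.Dict Char (List (Int × Int))),
         pvAbsDict (PySem.Dict.empty : PySem.Dict Char (List (Int × Int))),
         ([] : List (Int × Int))) from rfl]
    exact hfold
  rw [hfold']
  dsimp only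
  rw [pv_foldl_classify]
  rw [pv_fin_eq M ((((-1 : Int), (-1 : Int)), ((-1 : Int), (-1 : Int)))) ([], [])]
  have hnd : (M.map (·.1)).Nodup := hwf.1
  have hmain : pvAbsMain (PySem.Dict.mk M)
      = pvMainUpd M ((((-1 : Int), (-1 : Int)), ((-1 : Int), (-1 : Int)))) := by
    rw [pv_mainUpd_eq _ hnd]
    cases hf : M.find? (fun p => p.1 == 'X') with
    | none => simp [pvAbsMain, PySem.Dict.get?, hf]
    | some p => simp [pvAbsMain, PySem.Dict.get?, hf]
  rw [hmain]
  rfl
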